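-- pv_equiv track=rewrite | github.com/jwade109/Miscellaneous | vials/solve_vials.py | get_top_element
-- ===== SOURCE A (Python) =====
-- def get_top_element(vial):
--     for i, e in enumerate(vial):
--         if e != "-":
--             n = 0
--             # found a color; count them
--             for j in range(i, len(vial)):
--                 if vial[j] == e:
--                     n += 1
--                 else:
--                     break
--             return e, n
--     return "-", 0
-- ===== SOURCE B (Python) =====
-- def get_top_element(vial):
--     # One pass run-length encodes the vial, then the run list is scanned
--     # for the first run whose key is not "-".
--     runs = []
--     for e in vial:
--         if runs and runs[-1][0] == e:
--             runs[-1][1] += 1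
--         else:
--             runs.append([e, 1])
--     for key, n in runs:
--         if key != "-":
--             return key, n
--     return "-", 0
-- ===== Notes on version B (the rewrite author's own statement) =====
-- stated objective: alternative
-- what changed: B run-length-encodes the whole vial in one accumulator pass and then scans the run list for the first non-'-' run, instead of A's index-tracking outer loop with an inner counting loop.
import Mathlib
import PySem

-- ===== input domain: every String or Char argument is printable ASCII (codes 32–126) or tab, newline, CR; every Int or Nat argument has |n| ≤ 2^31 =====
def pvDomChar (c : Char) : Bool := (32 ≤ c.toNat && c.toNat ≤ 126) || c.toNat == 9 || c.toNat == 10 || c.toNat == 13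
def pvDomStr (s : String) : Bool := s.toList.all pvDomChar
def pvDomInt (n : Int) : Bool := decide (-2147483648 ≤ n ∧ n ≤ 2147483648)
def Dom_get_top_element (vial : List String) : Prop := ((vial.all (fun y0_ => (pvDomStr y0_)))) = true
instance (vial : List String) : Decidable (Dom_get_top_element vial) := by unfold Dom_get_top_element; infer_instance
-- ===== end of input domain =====

-- B run-length-encodes the vial in one accumulator pass, then scans the run list
-- for the first non-"-" run; A uses an index-tracking outer loop with an inner counting loop.

-- ===== PORT A =====
-- A's inner loop: count elements equal to e from the current position, stop at first mismatch
def pvCountA (e : String) : List String → Int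
  | [] => 0
  | y :: ys => if y = e then 1 + pvCountA e ys else 0

-- A's outer loop: skip "-" entries; on the first other entry return it with its run count
def get_top_element : List String → String × Int
  | [] => ("-", 0)
  | e :: rest => if e ≠ "-" then (e, pvCountA e (e :: rest)) else get_top_element rest

-- ===== PORT B =====
-- B's first pass: run-length encoding, extending/creating the run at the END of the list
def pvBuildRuns (runs : List (String × Int)) : List String → List (String × Int)
  | [] => runs
  | e :: rest =>
    match runs.getLast? with
    | some (k, n) =>
      if k = e then pvBuildRuns (runs.dropLast ++ [(k, n + 1)]) rest
      else pvBuildRuns (runs ++ [(e, 1)]) rest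
    | none => pvBuildRuns [(e, 1)] rest

-- B's second pass: first run whose key is not "-"
def pvFirstRun : List (String × Int) → String × Int
  | [] => ("-", 0)
  | (k, n) :: rest => if k ≠ "-" then (k, n) else pvFirstRun rest

def get_top_element_alt (vial : List String) : String × Int :=
  pvFirstRun (pvBuildRuns [] vial)

-- ===== PRECONDITION & SPEC =====
def Spec_get_top_element (vial : List String) (out : String × Int) : Prop := out = get_top_element_alt vial
instance (vial : List String) (out : String × Int) : Decidable (Spec_get_top_element vial out) := by unfold Spec_get_top_element; infer_instance

-- ===== CLAIM (what is proved, stated in full; the proofs are below) =====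
def Claim_equal_get_top_element : Prop := ∀ (vial : List String), Dom_get_top_element vial → Spec_get_top_element vial (get_top_element vial)

-- ===== LEMMAS AND PROOFS =====

-- canonical run-length encoding, by leading-run decomposition
def pvRLE : List String → List (String × Int)
  | [] => []
  | x :: xs =>
    (x, 1 + ((xs.takeWhile (fun y => y = x)).length : Int)) :: pvRLE (xs.dropWhile (fun y => y = x))
  termination_by l => l.length
  decreasing_by
    simp only [List.length_cons]
    exact Nat.lt_succ_of_le (List.length_dropWhile_le _ _)

theorem pvBuildRuns_append (l : List String) : ∀ (rs : List (String × Int)) (k : String) (n : Int),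
    pvBuildRuns (rs ++ [(k, n)]) l = rs ++ pvBuildRuns [(k, n)] l := by
  induction l with
  | nil => intro rs k n; simp [pvBuildRuns]
  | cons e rest ih =>
    intro rs k n
    simp only [pvBuildRuns, List.getLast?_concat, List.getLast?_singleton, List.dropLast_concat]
    by_cases h : k = e
    · simp only [if_pos h]
      have hd : ([(k, n)] : List (String × Int)).dropLast ++ [(k, n + 1)] = [(k, n + 1)] := rfl
      rw [hd, ih rs k (n + 1)]
    · simp only [if_neg h]
      rw [ih (rs ++ [(k, n)]) e 1, ih [(k, n)] e 1, List.append_assoc]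

theorem pvBuildRuns_one (l : List String) : ∀ (k : String) (n : Int),
    pvBuildRuns [(k, n)] l
      = (k, n + ((l.takeWhile (fun y => y = k)).length : Int)) :: pvRLE (l.dropWhile (fun y => y = k)) := by
  induction l with
  | nil => intro k n; simp [pvBuildRuns, pvRLE]
  | cons e rest ih =>
    intro k n
    by_cases h : k = e
    · subst h
      simp only [pvBuildRuns, List.getLast?_singleton]
      rw [if_true]
      have hd : ([(k, n)] : List (String × Int)).dropLast ++ [(k, n + 1)] = [(k, n + 1)] := rfl
      rw [hd, ih k (n + 1)]
      simp [List.takeWhile, List.dropWhile]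
      ring_nf
    · have he : ¬ (e = k) := fun hh => h hh.symm
      simp only [pvBuildRuns, List.getLast?_singleton]
      rw [if_neg h, pvBuildRuns_append rest [(k, n)] e 1, ih e 1]
      simp [List.takeWhile, List.dropWhile, he, pvRLE]

theorem pvBuildRuns_nil_eq_RLE (l : List String) : pvBuildRuns [] l = pvRLE l := by
  cases l with
  | nil => simp [pvBuildRuns, pvRLE]
  | cons x xs =>
    simp only [pvBuildRuns, List.getLast?_nil, pvRLE]
    rw [pvBuildRuns_one]

theorem pvCountA_eq_takeWhile (e : String) (l : List String) :
    pvCountA e l = ((l.takeWhile (fun y => y = e)).length : Int) := by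
  induction l with
  | nil => simp [pvCountA]
  | cons y ys ih =>
    by_cases h : y = e
    · simp [pvCountA, h, List.takeWhile, ih]; ring
    · simp [pvCountA, h, List.takeWhile]

theorem pvA_dropWhile (l : List String) :
    get_top_element (l.dropWhile (fun y => y = "-")) = get_top_element l := by
  induction l with
  | nil => rfl
  | cons x xs ih =>
    by_cases h : x = "-"
    · simpa [List.dropWhile, h, get_top_element] using ih
    · simp [List.dropWhile, h, get_top_element]

theorem pvFirstRun_RLE (l : List String) : pvFirstRun (pvRLE l) = get_top_element l := by
  cases l with
  | nil => simp [pvRLE, pvFirstRun, get_top_element]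
  | cons x xs =>
    simp only [pvRLE, pvFirstRun]
    by_cases h : x = "-"
    · subst h
      simp only [ne_eq, not_true_eq_false, ite_false]
      rw [pvFirstRun_RLE (xs.dropWhile (fun y => y = "-"))]
      rw [pvA_dropWhile xs]
      simp [get_top_element]
    · simp only [ne_eq, h, not_false_eq_true, get_top_element, if_pos]
      simp [pvCountA, pvCountA_eq_takeWhile]
  termination_by l.length
  decreasing_by
    simp only [List.length_cons]
    exact Nat.lt_succ_of_le (List.length_dropWhile_le _ _)

-- ===== VERDICT (by name: the statement is the Claim_ definition above) =====
theorem get_top_element_spec : Claim_equal_get_top_element := by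
  intro vial _
  unfold Spec_get_top_element get_top_element_alt
  rw [pvBuildRuns_nil_eq_RLE, pvFirstRun_RLE]
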